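-- pv_equiv track=rewrite | github.com/michalvalco/drone-delivery-rl-agent | environment/drone_env.py | _nearest_cells_to
-- ===== SOURCE A (Python) =====
-- from typing import Optional, Tuple, List, Dict
--
-- def _nearest_cells_to(pos: Tuple[int, int], max_radius: int = 3) -> List[Tuple[int, int]]:
--     cx, cy = pos
--     cells = []
--     for r in range(1, max_radius + 1):
--         for dx in range(-r, r + 1):
--             for dy in range(-r, r + 1):
--                 if abs(dx) + abs(dy) == r:
--                     cells.append((cx + dx, cy + dy))
--     return cells
-- ===== SOURCE B (Python) =====
-- from typing import Tuple, List
--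
-- def _ring(cx: int, cy: int, r: int) -> List[Tuple[int, int]]:
--     # One diamond ring of radius r, in A's dx/dy order: the single left tip,
--     # then for each interior dx its two cells (dy = -(r-|dx|), +(r-|dx|)),
--     # then the single right tip. No scan over dy, no membership test.
--     mid = [p for dx in range(-r + 1, r)
--              for k in (r - abs(dx),)
--              for p in ((cx + dx, cy - k), (cx + dx, cy + k))]
--     return [(cx - r, cy)] + mid + [(cx + r, cy)]
--
-- def _nearest_cells_to(pos: Tuple[int, int], max_radius: int = 3) -> List[Tuple[int, int]]:
--     cx, cy = pos
--     return [c for r in range(1, max_radius + 1) for c in _ring(cx, cy, r)]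
-- ===== Notes on version B (the rewrite author's own statement) =====
-- stated objective: faster
-- what changed: B builds each diamond ring in closed form (left tip, two cells per interior dx, right tip) and concatenates the rings, dropping A's triple loop with membership test; intended as faster (O(R^2) vs O(R^3)), measured 32x at the largest size both finished (n=1024), unconfirmed beyond.
import Mathlib
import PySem

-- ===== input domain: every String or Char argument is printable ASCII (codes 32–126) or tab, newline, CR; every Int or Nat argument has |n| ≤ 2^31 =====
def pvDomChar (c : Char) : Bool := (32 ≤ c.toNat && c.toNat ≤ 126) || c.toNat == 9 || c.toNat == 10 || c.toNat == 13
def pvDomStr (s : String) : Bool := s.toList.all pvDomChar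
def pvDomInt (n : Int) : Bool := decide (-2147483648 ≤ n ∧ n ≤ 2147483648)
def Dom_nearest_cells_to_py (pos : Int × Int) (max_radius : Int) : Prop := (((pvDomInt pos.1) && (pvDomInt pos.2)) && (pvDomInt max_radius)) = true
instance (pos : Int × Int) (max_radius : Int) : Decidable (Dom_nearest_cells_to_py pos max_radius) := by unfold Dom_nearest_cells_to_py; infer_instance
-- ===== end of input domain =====

-- B builds each diamond ring in closed form (left tip, two cells per interior dx, right tip)
-- and concatenates the rings, dropping A's triple loop with membership test; intended as faster
-- (O(R^2) vs A's O(R^3)); measured 32x at n=1024, unconfirmed at larger sizes.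

-- ===== PORT A =====
def nearest_cells_to_py (pos : Int × Int) (max_radius : Int) : List (Int × Int) :=
  let cx := pos.1
  let cy := pos.2
  (PySem.List.pyRange 1 (max_radius + 1) 1).foldl (fun cells r =>
    (PySem.List.pyRange (-r) (r + 1) 1).foldl (fun cells dx =>
      (PySem.List.pyRange (-r) (r + 1) 1).foldl (fun cells dy =>
        if |dx| + |dy| = r then cells ++ [(cx + dx, cy + dy)] else cells) cells) cells) []

-- ===== PORT B =====
-- helper _ring: one diamond ring, tips explicit, two cells per interior dx
def pvRing (cx cy r : Int) : List (Int × Int) :=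
  let mid := (PySem.List.pyRange (-r + 1) r 1).flatMap (fun dx =>
    let k := r - |dx|
    [(cx + dx, cy - k), (cx + dx, cy + k)])
  [(cx - r, cy)] ++ mid ++ [(cx + r, cy)]

def nearest_cells_to_py_alt (pos : Int × Int) (max_radius : Int) : List (Int × Int) :=
  (PySem.List.pyRange 1 (max_radius + 1) 1).flatMap (fun r => pvRing pos.1 pos.2 r)

-- ===== PRECONDITION & SPEC =====
def Spec_nearest_cells_to_py (pos : Int × Int) (max_radius : Int) (out : List (Int × Int)) : Prop := out = nearest_cells_to_py_alt pos max_radius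
instance (pos : Int × Int) (max_radius : Int) (out : List (Int × Int)) : Decidable (Spec_nearest_cells_to_py pos max_radius out) := by unfold Spec_nearest_cells_to_py; infer_instance

-- ===== CLAIM =====
def Claim_equal_nearest_cells_to_py : Prop := ∀ (pos : Int × Int) (max_radius : Int), Dom_nearest_cells_to_py pos max_radius → Spec_nearest_cells_to_py pos max_radius (nearest_cells_to_py pos max_radius)

-- ===== LEMMAS AND PROOFS =====

-- filter 'y = c' over an int range containing c picks out exactly [c].
theorem filter_pyRange_eq_singleton (lo hi c : Int) (h1 : lo ≤ c) (h2 : c < hi) :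
    (PySem.List.pyRange lo hi 1).filter (fun y => decide (y = c)) = [c] := by
  rw [PySem.List.pyRange_one_append lo c hi h1 (by omega),
      PySem.List.pyRange_one_cons (by omega : c < hi)]
  rw [List.filter_append, List.filter_cons]
  simp only [decide_eq_true_eq]
  have hl : (PySem.List.pyRange lo c 1).filter (fun y => decide (y = c)) = [] := by
    apply List.filter_eq_nil_iff.mpr
    intro y hy
    have := PySem.List.mem_pyRange_one.mp hy
    simp only [decide_eq_true_eq]
    omega
  have hr : (PySem.List.pyRange (c + 1) hi 1).filter (fun y => decide (y = c)) = [] := by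
    apply List.filter_eq_nil_iff.mpr
    intro y hy
    have := PySem.List.mem_pyRange_one.mp hy
    simp only [decide_eq_true_eq]
    omega
  simp [hl, hr]

-- the qualifying dy values of A's inner scan, in order
theorem filter_ring (r dx : Int) (hdx1 : -r ≤ dx) (hdx2 : dx < r + 1) :
    (PySem.List.pyRange (-r) (r + 1) 1).filter (fun dy => decide (|dx| + |dy| = r))
      = if r - |dx| = 0 then [(0 : Int)] else [-(r - |dx|), r - |dx|] := by
  have hr : 0 ≤ r := by omega
  have habs : |dx| ≤ r := abs_le.mpr ⟨hdx1, by omega⟩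
  set k := r - |dx| with hk
  have hk0 : 0 ≤ k := by omega
  by_cases h0 : k = 0
  · rw [if_pos h0]
    have : ∀ y ∈ PySem.List.pyRange (-r) (r + 1) 1,
        decide (|dx| + |y| = r) = decide (y = (0 : Int)) := by
      intro y _
      rw [decide_eq_decide]
      constructor
      · intro h; rcases abs_cases y with ⟨h1, _⟩ | ⟨h1, _⟩ <;> omega
      · intro h; subst h; simp; omega
    rw [List.filter_congr this]
    exact filter_pyRange_eq_singleton _ _ _ (by omega) (by omega)
  · rw [if_neg h0]
    have hkpos : 0 < k := lt_of_le_of_ne hk0 (Ne.symm h0)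
    have hdx0 : 0 ≤ |dx| := abs_nonneg dx
    rw [PySem.List.pyRange_one_append (-r) 0 (r + 1) (by omega) (by omega), List.filter_append]
    have habsy : ∀ y : Int, (|dx| + |y| = r) ↔ (y = -k ∨ y = k) := by
      intro y
      rcases abs_cases y with ⟨h1, _⟩ | ⟨h1, _⟩ <;> constructor <;> intro h <;> omega
    have hleft : (PySem.List.pyRange (-r) 0 1).filter (fun dy => decide (|dx| + |dy| = r))
        = [-k] := by
      have hc : ∀ y ∈ PySem.List.pyRange (-r) 0 1,
          decide (|dx| + |y| = r) = decide (y = -k) := by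
        intro y hy
        have := PySem.List.mem_pyRange_one.mp hy
        rw [decide_eq_decide]
        constructor
        · intro h; rcases (habsy y).mp h with h | h <;> omega
        · intro h; exact (habsy y).mpr (Or.inl h)
      rw [List.filter_congr hc]
      exact filter_pyRange_eq_singleton _ _ _ (by omega) (by omega)
    have hright : (PySem.List.pyRange 0 (r + 1) 1).filter (fun dy => decide (|dx| + |dy| = r))
        = [k] := by
      have hc : ∀ y ∈ PySem.List.pyRange 0 (r + 1) 1,
          decide (|dx| + |y| = r) = decide (y = k) := by
        intro y hy
        have := PySem.List.mem_pyRange_one.mp hy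
        rw [decide_eq_decide]
        constructor
        · intro h; rcases (habsy y).mp h with h | h <;> omega
        · intro h; exact (habsy y).mpr (Or.inr h)
      rw [List.filter_congr hc]
      exact filter_pyRange_eq_singleton _ _ _ (by omega) (by omega)
    rw [hleft, hright]
    rfl

-- A's dx+dy double scan for one radius r collects exactly B's ring.
theorem ring_eq (cx cy r : Int) (hr : 1 ≤ r) (acc : List (Int × Int)) :
    (PySem.List.pyRange (-r) (r + 1) 1).foldl (fun cells dx =>
      (PySem.List.pyRange (-r) (r + 1) 1).foldl (fun cells dy =>
        if |dx| + |dy| = r then cells ++ [(cx + dx, cy + dy)] else cells) cells) acc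
    = acc ++ pvRing cx cy r := by
  have hstep : ∀ (a : List (Int × Int)), ∀ dx ∈ PySem.List.pyRange (-r) (r + 1) 1,
      (PySem.List.pyRange (-r) (r + 1) 1).foldl (fun cells dy =>
        if |dx| + |dy| = r then cells ++ [(cx + dx, cy + dy)] else cells) a
      = a ++ ((PySem.List.pyRange (-r) (r + 1) 1).filter
          (fun dy => decide (|dx| + |dy| = r))).map (fun dy => (cx + dx, cy + dy)) := by
    intro a dx _
    exact PySem.List.foldl_append_ite (fun dy => |dx| + |dy| = r) _ _ _
  have hcong := PySem.List.foldl_congr_mem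
    (l := PySem.List.pyRange (-r) (r + 1) 1)
    (f := fun cells dx => (PySem.List.pyRange (-r) (r + 1) 1).foldl (fun cells dy =>
        if |dx| + |dy| = r then cells ++ [(cx + dx, cy + dy)] else cells) cells)
    (g := fun cells dx => cells ++ ((PySem.List.pyRange (-r) (r + 1) 1).filter
        (fun dy => decide (|dx| + |dy| = r))).map (fun dy => (cx + dx, cy + dy)))
    (init := acc) hstep
  rw [hcong, PySem.List.foldl_append_eq_flatMap]
  congr 1
  have habsr : |(-r : Int)| = r := by rw [abs_neg]; exact abs_of_pos (by omega)
  -- replace each inner filter+map by its closed form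
  have hco : ∀ dx ∈ PySem.List.pyRange (-r) (r + 1) 1,
      ((PySem.List.pyRange (-r) (r + 1) 1).filter (fun dy => decide (|dx| + |dy| = r))).map
          (fun dy => (cx + dx, cy + dy))
        = (if r - |dx| = 0 then [(cx + dx, cy)]
           else [(cx + dx, cy - (r - |dx|)), (cx + dx, cy + (r - |dx|))]) := by
    intro dx hdx
    have hm := PySem.List.mem_pyRange_one.mp hdx
    rw [filter_ring r dx hm.1 hm.2]
    by_cases h0 : r - |dx| = 0
    · simp [h0]
    · rw [if_neg h0, if_neg h0]
      simp [Int.sub_eq_add_neg]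
  rw [List.flatMap_congr hco]
  -- split the dx range into left tip, interior, right tip
  have hsplit : PySem.List.pyRange (-r) (r + 1) 1
      = -r :: (PySem.List.pyRange (-r + 1) r 1 ++ [r]) := by
    rw [PySem.List.pyRange_one_cons (by omega : -r < r + 1),
        PySem.List.pyRange_one_append (-r + 1) r (r + 1) (by omega) (by omega),
        PySem.List.pyRange_one_cons (by omega : r < r + 1),
        PySem.List.pyRange_one_eq_nil (le_refl (r + 1))]
  rw [hsplit]
  simp only [List.flatMap_cons, List.flatMap_append, List.flatMap_nil, List.append_nil]
  have hmid : ∀ dx ∈ PySem.List.pyRange (-r + 1) r 1,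
      (if r - |dx| = 0 then [(cx + dx, cy)]
       else [(cx + dx, cy - (r - |dx|)), (cx + dx, cy + (r - |dx|))])
        = [(cx + dx, cy - (r - |dx|)), (cx + dx, cy + (r - |dx|))] := by
    intro dx hdx
    have hm := PySem.List.mem_pyRange_one.mp hdx
    have habs : |dx| < r := abs_lt.mpr (by omega)
    rw [if_neg (by omega)]
  rw [List.flatMap_congr hmid]
  rw [if_pos (by rw [habsr]; omega), if_pos (by rw [abs_of_pos (by omega : (0:Int) < r)]; omega)]
  simp [pvRing, Int.sub_eq_add_neg]

theorem nearest_cells_to_py_spec : Claim_equal_nearest_cells_to_py := by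
  intro pos max_radius _
  show nearest_cells_to_py pos max_radius = nearest_cells_to_py_alt pos max_radius
  unfold nearest_cells_to_py nearest_cells_to_py_alt
  show (PySem.List.pyRange 1 (max_radius + 1) 1).foldl _ [] = _
  have hcong := PySem.List.foldl_congr_mem
    (l := PySem.List.pyRange 1 (max_radius + 1) 1)
    (f := fun cells r => (PySem.List.pyRange (-r) (r + 1) 1).foldl (fun cells dx =>
      (PySem.List.pyRange (-r) (r + 1) 1).foldl (fun cells dy =>
        if |dx| + |dy| = r then cells ++ [(pos.1 + dx, pos.2 + dy)] else cells) cells) cells)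
    (g := fun cells r => cells ++ pvRing pos.1 pos.2 r)
    (init := ([] : List (Int × Int)))
    (fun a r hr => ring_eq pos.1 pos.2 r (PySem.List.mem_pyRange_one.mp hr).1 a)
  rw [hcong, PySem.List.foldl_append_eq_flatMap]
  simp

-- ===== VERDICT (by name: the statement is the Claim_ definition above) =====
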